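-- pv_equiv track=rewrite | github.com/dancing-bear-show/dancing-bear | mail/labels/commands.py | _is_protected_sender
-- ===== SOURCE A (Python) =====
-- def _extract_domain(email: str) -> str:
--     """Extract domain from email address."""
--     return email.split('@')[-1].lower().strip() if '@' in email else email.lower().strip()
--
-- def _is_protected_sender(email: str, protected_patterns: list) -> bool:
--     """Check if sender matches any protected pattern."""
--     domain = _extract_domain(email)
--     for pattern in protected_patterns:
--         if not pattern:
--             continue
--         if pattern.startswith('@'):
--             if email.endswith(pattern) or domain == pattern.lstrip('@'):
--                 return True
--         elif pattern == email:
--             return True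
--     return False
-- ===== SOURCE B (Python) =====
-- def _extract_domain(email: str) -> str:
--     """Extract domain from email address."""
--     return email.split('@')[-1].lower().strip() if '@' in email else email.lower().strip()
--
-- def _is_protected_sender(email: str, protected_patterns: list) -> bool:
--     """Reverse-lookup version: index the patterns once into three hash sets,
--     then probe with keys derived from the email (the email itself, its domain,
--     and each suffix of the email that starts at an '@') instead of scanning
--     the pattern list per condition."""
--     exact = set()
--     stripped = set()
--     at_suffix = set()
--     for p in protected_patterns:
--         if not p:
--             continue
--         if p[0] == '@':
--             at_suffix.add(p)
--             stripped.add(p.lstrip('@'))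
--         else:
--             exact.add(p)
--     if email in exact:
--         return True
--     if _extract_domain(email) in stripped:
--         return True
--     # email.endswith(p) for some '@'-pattern p  <=>  some suffix of email
--     # beginning at an '@' character is itself one of those patterns.
--     return any(email[i:] in at_suffix for i, c in enumerate(email) if c == '@')
-- ===== Notes on version B (the rewrite author's own statement) =====
-- stated objective: alternative
-- what changed: B inverts the per-pattern scan into reverse lookups: the patterns are indexed once into three hash sets (exact emails, lstripped domains, raw '@'-patterns) and then probed with keys derived from the email — the email itself, its extracted domain, and each suffix of the email beginning at an '@' character (equivalent to email.endswith(p) for '@'-patterns) — so no per-condition pass over the pattern list remains after the index is built.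
import Mathlib
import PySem

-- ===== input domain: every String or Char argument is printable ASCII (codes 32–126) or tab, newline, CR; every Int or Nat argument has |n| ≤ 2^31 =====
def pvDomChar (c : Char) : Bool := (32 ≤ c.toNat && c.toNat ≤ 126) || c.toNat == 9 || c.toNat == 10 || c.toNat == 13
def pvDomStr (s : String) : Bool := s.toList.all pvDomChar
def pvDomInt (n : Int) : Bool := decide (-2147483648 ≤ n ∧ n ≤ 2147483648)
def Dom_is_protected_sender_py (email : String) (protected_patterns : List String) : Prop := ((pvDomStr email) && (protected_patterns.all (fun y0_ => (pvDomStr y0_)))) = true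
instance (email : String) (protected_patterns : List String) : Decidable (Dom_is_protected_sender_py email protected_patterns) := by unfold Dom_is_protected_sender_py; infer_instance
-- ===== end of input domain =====

-- B inverts the scan: the patterns are indexed once into three hash sets, and membership is probed with keys derived from the EMAIL (the email itself, its domain, and each suffix of the email starting at an '@') instead of testing each pattern against the email.

-- ===== PORT A =====
-- p.lstrip('@') : strip leading '@' characters (hand-ported, exact: drops leading '@'s only)
def pvLstripAtChars : List Char → List Char
  | [] => []
  | c :: cs => if c = '@' then pvLstripAtChars cs else c :: cs

def pvLstripAt (s : String) : String := String.ofList (pvLstripAtChars s.toList)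

-- _extract_domain: email.split('@')[-1].lower().strip() if '@' in email else email.lower().strip()
def pvExtractDomain (email : String) : String :=
  if PySem.Str.isIn "@" email then
    PySem.Str.strip (PySem.Str.lower ((PySem.List.pyGet? ((PySem.Str.split? email "@").getD []) (-1)).getD ""))
  else
    PySem.Str.strip (PySem.Str.lower email)

-- the for-loop of A with its early returns
def pvALoop (email domain : String) : List String → Bool
  | [] => false
  | p :: rest =>
      if p == "" then pvALoop email domain rest
      else if PySem.Str.startswith p "@" then
        if PySem.Str.endswith email p || domain == pvLstripAt p then true
        else pvALoop email domain rest
      else if p == email then true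
      else pvALoop email domain rest

def is_protected_sender_py (email : String) (protected_patterns : List String) : Bool :=
  let domain := pvExtractDomain email
  pvALoop email domain protected_patterns

-- ===== PORT B =====
-- indexing pass of B: exact-match set, lstripped-domain set, raw '@'-suffix set
def pvBStep (acc : PySem.Set String × PySem.Set String × PySem.Set String) (p : String) :
    PySem.Set String × PySem.Set String × PySem.Set String :=
  if p == "" then acc
  else if PySem.List.pyGet? p.toList 0 == some '@' then    -- p[0] == '@' (p nonempty here)
    (acc.1, acc.2.1.add (pvLstripAt p), acc.2.2.add p)
  else (acc.1.add p, acc.2.1, acc.2.2)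

-- any(email[i:] in at_suffix for i, c in enumerate(email) if c == '@')
def pvSuffixScan (email : String) (s : PySem.Set String) : Bool :=
  (PySem.List.enumerate email.toList 0).any
    (fun ic => ic.2 == '@' && s.contains (String.ofList (PySem.List.slice email.toList (some ic.1) none)))

def is_protected_sender_py_alt (email : String) (protected_patterns : List String) : Bool :=
  let idx := protected_patterns.foldl pvBStep (PySem.Set.empty, PySem.Set.empty, PySem.Set.empty)
  if idx.1.contains email then true
  else if idx.2.1.contains (pvExtractDomain email) then true
  else pvSuffixScan email idx.2.2

-- ===== PRECONDITION & SPEC =====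
def Spec_is_protected_sender_py (email : String) (protected_patterns : List String) (out : Bool) : Prop := out = is_protected_sender_py_alt email protected_patterns
instance (email : String) (protected_patterns : List String) (out : Bool) : Decidable (Spec_is_protected_sender_py email protected_patterns out) := by unfold Spec_is_protected_sender_py; infer_instance

-- ===== CLAIM (what is proved, stated in full; the proofs are below) =====
def Claim_equal_is_protected_sender_py : Prop := ∀ (email : String) (protected_patterns : List String), Dom_is_protected_sender_py email protected_patterns → Spec_is_protected_sender_py email protected_patterns (is_protected_sender_py email protected_patterns)

-- ===== LEMMAS AND PROOFS =====

lemma pv_add_contains (s : PySem.Set String) (p q : String) :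
    (s.add p).contains q = (s.contains q || q == p) := by
  rw [Bool.eq_iff_iff]
  simp [PySem.Set.mem_add]

-- A's startswith('@') test equals B's p[0] == '@' test (on every string)
lemma pv_startswith_at (p : String) :
    PySem.Str.startswith p "@" = (PySem.List.pyGet? p.toList 0 == some '@') := by
  rw [Bool.eq_iff_iff]
  cases h : p.toList with
  | nil => simp [PySem.Chars.startswith_iff, h, PySem.List.pyGet?]
  | cons c cs =>
    simp only [PySem.Str.startswith_eq, PySem.Chars.startswith_iff, h]
    constructor
    · rintro hpre
      rcases hpre with ⟨t, ht⟩
      have : c = '@' := by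
        have : "@".toList = ['@'] := rfl
        rw [this] at ht
        simpa using congrArg (fun l => l.head?) ht.symm
      simp [this, PySem.List.pyGet?, PySem.List.pyIdx?]
    · intro hg
      have hc : c = '@' := by
        by_contra hne
        simp [PySem.List.pyGet?, PySem.List.pyIdx?, hne] at hg
      exact ⟨cs, by simp [hc]⟩

lemma pv_mem_enumerate (l : List Char) (k : Int) (x : Int × Char) :
    x ∈ PySem.List.enumerate l k ↔ ∃ j : Nat, l[j]? = some x.2 ∧ x.1 = k + (j : Int) := by
  induction l generalizing k with
  | nil => simp [PySem.List.enumerate]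
  | cons a as ih =>
    rw [PySem.List.enumerate_cons, List.mem_cons, ih (k + 1)]
    constructor
    · rintro (h | ⟨j, hj, hk⟩)
      · exact ⟨0, by simp [h], by simp [h]⟩
      · exact ⟨j + 1, by simpa using hj, by push_cast at hk ⊢; omega⟩
    · rintro ⟨j, hj, hk⟩
      cases j with
      | zero =>
        left
        simp only [List.getElem?_cons_zero, Option.some.injEq] at hj
        have : x.1 = k := by omega
        rw [Prod.ext_iff]; exact ⟨this, hj.symm⟩
      | succ j' =>
        right
        exact ⟨j', by simpa using hj, by push_cast at hk ⊢; omega⟩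

lemma pv_suffixScan_iff (email : String) (s : PySem.Set String) :
    pvSuffixScan email s = true ↔
      ∃ i : Nat, email.toList[i]? = some '@' ∧
        s.contains (String.ofList (email.toList.drop i)) = true := by
  unfold pvSuffixScan
  rw [List.any_eq_true]
  constructor
  · rintro ⟨ic, hmem, hf⟩
    obtain ⟨j, hj, hk⟩ := (pv_mem_enumerate _ _ _).mp hmem
    rw [Bool.and_eq_true] at hf
    have hc : ic.2 = '@' := by simpa using hf.1
    refine ⟨j, by rw [← hc]; exact hj, ?_⟩
    have hsl : PySem.List.slice email.toList (some ic.1) none = email.toList.drop j := by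
      rw [hk, show (0:Int) + (j:Int) = ((j:Nat):Int) by ring]
      exact PySem.List.slice_from_natCast email.toList j
    rw [hsl] at hf
    exact hf.2
  · rintro ⟨i, h1, h2⟩
    refine ⟨((i : Int), '@'), (pv_mem_enumerate _ _ _).mpr ⟨i, h1, by omega⟩, ?_⟩
    rw [Bool.and_eq_true]
    refine ⟨by simp, ?_⟩
    have hsl : PySem.List.slice email.toList (some ((i : Int))) none = email.toList.drop i :=
      PySem.List.slice_from_natCast email.toList i
    rw [hsl]
    exact h2

-- for a pattern starting with '@', "some '@'-suffix of email equals p" is exactly email.endswith(p)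
lemma pv_at_suffix_iff (email p : String) (hp : PySem.Str.startswith p "@" = true) :
    (∃ i : Nat, email.toList[i]? = some '@' ∧ email.toList.drop i = p.toList)
      ↔ PySem.Str.endswith email p = true := by
  have hpl : ∃ cs, p.toList = '@' :: cs := by
    rcases (PySem.Chars.startswith_iff _ _).mp (by simpa using hp) with ⟨t, ht⟩
    exact ⟨t, by simpa using ht.symm⟩
  rcases hpl with ⟨cs, hcs⟩
  simp only [PySem.Str.endswith_eq, PySem.Chars.endswith_iff]
  constructor
  · rintro ⟨i, _, hdrop⟩
    exact hdrop ▸ List.drop_suffix i email.toList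
  · rintro ⟨t, ht⟩
    refine ⟨t.length, ?_, ?_⟩
    · rw [← ht]
      simp [hcs]
    · rw [← ht, List.drop_left]

lemma pv_suffixScan_add (email : String) (s : PySem.Set String) (p : String)
    (hp : PySem.Str.startswith p "@" = true) :
    pvSuffixScan email (s.add p) = (pvSuffixScan email s || PySem.Str.endswith email p) := by
  rw [Bool.eq_iff_iff, Bool.or_eq_true, pv_suffixScan_iff, pv_suffixScan_iff, ← pv_at_suffix_iff email p hp]
  constructor
  · rintro ⟨i, h1, h2⟩
    rw [pv_add_contains, Bool.or_eq_true] at h2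
    rcases h2 with h2 | h2
    · exact Or.inl ⟨i, h1, h2⟩
    · refine Or.inr ⟨i, h1, ?_⟩
      have : String.ofList (email.toList.drop i) = p := by simpa using h2
      rw [← this]; simp
  · rintro (⟨i, h1, h2⟩ | ⟨i, h1, h2⟩)
    · exact ⟨i, h1, by rw [pv_add_contains, h2, Bool.true_or]⟩
    · refine ⟨i, h1, ?_⟩
      rw [pv_add_contains]
      have : String.ofList (email.toList.drop i) = p := by rw [h2]; simp
      simp [this]

def pvBFinish (email domain : String) (st : PySem.Set String × PySem.Set String × PySem.Set String) : Bool :=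
  if st.1.contains email then true
  else if st.2.1.contains domain then true
  else pvSuffixScan email st.2.2

lemma pvBFinish_eq (email domain : String) (st : PySem.Set String × PySem.Set String × PySem.Set String) :
    pvBFinish email domain st =
      (st.1.contains email || st.2.1.contains domain || pvSuffixScan email st.2.2) := by
  unfold pvBFinish
  split_ifs <;> simp_all

set_option maxHeartbeats 1000000 in
set_option maxRecDepth 4096 in
lemma pvB_loop_eq (email domain : String) :
    ∀ (pats : List String) (st : PySem.Set String × PySem.Set String × PySem.Set String),
      pvBFinish email domain (pats.foldl pvBStep st) =
        (pvBFinish email domain st || pvALoop email domain pats) := by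
  intro pats
  induction pats with
  | nil => intro st; simp [pvALoop]
  | cons p rest ih =>
    intro st
    rw [List.foldl_cons, ih]
    simp only [pvALoop, pvBStep]
    by_cases h0 : p == ""
    · simp only [h0, if_true]
    · by_cases h1 : PySem.Str.startswith p "@"
      · have h1' : (PySem.List.pyGet? p.toList 0 == some '@') = true := by
          rw [← pv_startswith_at]; exact h1
        simp only [h0, h1, h1', Bool.false_eq_true, if_false, if_true]
        rw [pvBFinish_eq, pvBFinish_eq]
        simp only [pv_add_contains, pv_suffixScan_add email _ p h1]
        by_cases h2 : PySem.Str.endswith email p <;>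
          by_cases h3 : domain == pvLstripAt p <;>
            simp [h3, Bool.or_assoc, Bool.or_comm, Bool.or_left_comm]
      · have h1' : (PySem.List.pyGet? p.toList 0 == some '@') = false := by
          rw [← pv_startswith_at]; simpa using h1
        simp only [h0, h1, h1', Bool.false_eq_true, if_false]
        rw [pvBFinish_eq, pvBFinish_eq, pv_add_contains]
        by_cases h2 : p == email
        · have he : (email == p) = true := by
            rw [beq_iff_eq] at h2 ⊢; exact h2.symm
          simp [h2, he]
        · have he : (email == p) = false := by
            rw [Bool.not_eq_true] at h2
            exact beq_eq_false_iff_ne.mpr (fun h => by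
              rw [beq_eq_false_iff_ne] at h2; exact h2 h.symm)
          simp [h2, he, Bool.or_comm]

-- ===== VERDICT (by name: the statement is the Claim_ definition above) =====
theorem is_protected_sender_py_spec : Claim_equal_is_protected_sender_py := by
  intro email pats _
  unfold Spec_is_protected_sender_py
  show pvALoop email (pvExtractDomain email) pats = _
  have hB : is_protected_sender_py_alt email pats =
      pvBFinish email (pvExtractDomain email)
        (pats.foldl pvBStep (PySem.Set.empty, PySem.Set.empty, PySem.Set.empty)) := rfl
  rw [hB, pvB_loop_eq, pvBFinish_eq]
  simp [PySem.Set.empty, pvSuffixScan]
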